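-- pv_equiv track=rewrite | github.com/rodehyde/arc-agi-solver | src/categories/transform_features.py | _is_rect_fill
-- ===== SOURCE A (Python) =====
-- def _is_rect_fill(cells: list[tuple[int, int]]) -> bool:
--     """True if cells fill an axis-aligned rectangle completely."""
--     if not cells:
--         return False
--     rows = [r for r, c in cells]
--     cols = [c for r, c in cells]
--     r0, r1 = min(rows), max(rows)
--     c0, c1 = min(cols), max(cols)
--     expected = {(r, c) for r in range(r0, r1 + 1) for c in range(c0, c1 + 1)}
--     return set(cells) == expected
-- ===== SOURCE B (Python) =====
-- def _is_rect_fill(cells: list[tuple[int, int]]) -> bool: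
--     """True if cells fill an axis-aligned rectangle completely.
--
--     One pass over the cells tracks the bounding box; instead of materialising
--     the expected rectangle, compare the number of distinct cells to its area.
--     """
--     if not cells:
--         return False
--     r, c = cells[0]
--     r0 = r1 = r
--     c0 = c1 = c
--     for r, c in cells[1:]:
--         if r < r0:
--             r0 = r
--         elif r > r1:
--             r1 = r
--         if c < c0:
--             c0 = c
--         elif c > c1:
--             c1 = c
--     return len(set(cells)) == (r1 - r0 + 1) * (c1 - c0 + 1)
-- ===== Notes on version B (the rewrite author's own statement) =====
-- stated objective: faster
-- what changed: Instead of materialising the full expected rectangle set and comparing sets, B finds the bounding box in one pass and compares the number of distinct cells to the box area.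
import Mathlib
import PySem

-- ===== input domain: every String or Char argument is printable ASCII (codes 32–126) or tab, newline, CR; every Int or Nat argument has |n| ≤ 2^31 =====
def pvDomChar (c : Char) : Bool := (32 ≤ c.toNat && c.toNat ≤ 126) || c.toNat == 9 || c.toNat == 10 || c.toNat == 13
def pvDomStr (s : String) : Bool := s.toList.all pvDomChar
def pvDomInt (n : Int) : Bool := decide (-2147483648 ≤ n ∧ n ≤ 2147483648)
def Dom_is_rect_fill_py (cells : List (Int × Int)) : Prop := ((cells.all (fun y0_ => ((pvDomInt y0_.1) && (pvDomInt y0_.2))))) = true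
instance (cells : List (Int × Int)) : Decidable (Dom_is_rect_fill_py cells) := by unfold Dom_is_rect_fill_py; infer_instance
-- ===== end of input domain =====

-- B replaces A's O(area) materialised rectangle set by a single bounding-box pass
-- plus a distinct-cell count compared to the box area (objective: faster).

-- ===== PORT A =====
-- literal transliteration of _is_rect_fill: min/max of the row and column lists,
-- the expected set as a comprehension over both ranges, set equality at the end.
-- The `none` match arms are unreachable (rows/cols are nonempty under the guard).
def is_rect_fill_py (cells : List (Int × Int)) : Bool :=
  if cells = [] then false
  else
    let rows := cells.map (fun p => p.1)
    let cols := cells.map (fun p => p.2)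
    match PySem.List.min? rows (fun y => y), PySem.List.max? rows (fun y => y),
          PySem.List.min? cols (fun y => y), PySem.List.max? cols (fun y => y) with
    | some r0, some r1, some c0, some c1 =>
        -- the set comprehension: its elements are pairwise distinct (product of two
        -- step-1 ranges), so Python's set of them is exactly this list — the Nodup
        -- proof is hndL in set_eq_rect_iff_len below (Set.ofList would be a
        -- quadratic re-scan that changes nothing on a duplicate-free list)
        let expected : PySem.Set (Int × Int) :=
          (PySem.List.pyRange r0 (r1 + 1) 1).flatMap (fun r =>
            (PySem.List.pyRange c0 (c1 + 1) 1).map (fun c => (r, c)))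
        PySem.Set.equal (PySem.Set.ofList cells) expected
    | _, _, _, _ => false

-- ===== PORT B =====
-- the body of B's for-loop: two independent if/elif chains updating the box
def rectFillStep (s : Int × Int × Int × Int) (p : Int × Int) : Int × Int × Int × Int :=
  match s, p with
  | (r0, r1, c0, c1), (r, c) =>
    let rr := if r < r0 then (r, r1) else if r > r1 then (r0, r) else (r0, r1)
    let cc := if c < c0 then (c, c1) else if c > c1 then (c0, c) else (c0, c1)
    (rr.1, rr.2, cc.1, cc.2)

def is_rect_fill_py_alt (cells : List (Int × Int)) : Bool :=
  match cells with
  | [] => false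
  | p :: tl =>
    match tl.foldl rectFillStep (p.1, p.1, p.2, p.2) with
    | (r0, r1, c0, c1) =>
      (((PySem.Set.ofList cells).length : Int) == (r1 - r0 + 1) * (c1 - c0 + 1))

-- ===== PRECONDITION & SPEC =====
def Spec_is_rect_fill_py (cells : List (Int × Int)) (out : Bool) : Prop := out = is_rect_fill_py_alt cells
instance (cells : List (Int × Int)) (out : Bool) : Decidable (Spec_is_rect_fill_py cells out) := by unfold Spec_is_rect_fill_py; infer_instance

-- ===== CLAIM (what is proved, stated in full; the proofs are below) =====
def Claim_equal_is_rect_fill_py : Prop := ∀ (cells : List (Int × Int)), Dom_is_rect_fill_py cells → Spec_is_rect_fill_py cells (is_rect_fill_py cells)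

-- ===== LEMMAS AND PROOFS =====

-- one step of B's loop is exactly running min/max on both coordinates
theorem rectFillStep_eq (a b c d r s : Int) (hab : a ≤ b) (hcd : c ≤ d) :
    rectFillStep (a, b, c, d) (r, s) = (min a r, max b r, min c s, max d s) := by
  simp only [rectFillStep]
  split_ifs <;> simp_all <;> omega

-- B's fold computes the running min/max of both coordinates
theorem foldl_rectFillStep (tl : List (Int × Int)) :
    ∀ (a b c d : Int), a ≤ b → c ≤ d →
      tl.foldl rectFillStep (a, b, c, d) =
        ((tl.map Prod.fst).foldl min a, (tl.map Prod.fst).foldl max b,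
         (tl.map Prod.snd).foldl min c, (tl.map Prod.snd).foldl max d) := by
  induction tl with
  | nil => intro a b c d _ _; rfl
  | cons q tl ih =>
    intro a b c d hab hcd
    simp only [List.foldl_cons, List.map_cons]
    rw [rectFillStep_eq a b c d q.1 q.2 hab hcd]
    exact ih _ _ _ _ (le_trans (min_le_left _ _) (le_trans hab (le_max_left _ _)))
      (le_trans (min_le_left _ _) (le_trans hcd (le_max_left _ _)))

-- the heart of the equivalence: a Nodup list inside the box equals the full
-- rectangle as a set iff its length is the box area
theorem set_eq_rect_iff_len (S : List (Int × Int)) (r0 r1 c0 c1 : Int)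
    (hS : S.Nodup) (hr : r0 ≤ r1) (hc : c0 ≤ c1)
    (hin : ∀ x ∈ S, r0 ≤ x.1 ∧ x.1 ≤ r1 ∧ c0 ≤ x.2 ∧ x.2 ≤ c1) :
    PySem.Set.equal S ((PySem.List.pyRange r0 (r1 + 1) 1).flatMap (fun r =>
        (PySem.List.pyRange c0 (c1 + 1) 1).map (fun c => (r, c))))
      = (((S.length : Int)) == (r1 - r0 + 1) * (c1 - c0 + 1)) := by
  set L : List (Int × Int) := (PySem.List.pyRange r0 (r1 + 1) 1).flatMap (fun r =>
      (PySem.List.pyRange c0 (c1 + 1) 1).map (fun c => (r, c))) with hL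
  have hprod : L = (PySem.List.pyRange r0 (r1 + 1) 1) ×ˢ (PySem.List.pyRange c0 (c1 + 1) 1) := rfl
  have hndL : L.Nodup := by
    rw [hprod]; exact List.Nodup.product (PySem.List.nodup_pyRange_one _ _) (PySem.List.nodup_pyRange_one _ _)
  have hmemL : ∀ x : Int × Int, x ∈ L ↔ (r0 ≤ x.1 ∧ x.1 ≤ r1 ∧ c0 ≤ x.2 ∧ x.2 ≤ c1) := by
    intro ⟨a, b⟩
    rw [hprod]
    have h1 : (a, b) ∈ (PySem.List.pyRange r0 (r1 + 1) 1) ×ˢ (PySem.List.pyRange c0 (c1 + 1) 1) ↔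
        a ∈ PySem.List.pyRange r0 (r1 + 1) 1 ∧ b ∈ PySem.List.pyRange c0 (c1 + 1) 1 :=
      List.pair_mem_product
    rw [h1, PySem.List.mem_pyRange_one, PySem.List.mem_pyRange_one]
    omega
  have hlenL : (L.length : Int) = (r1 - r0 + 1) * (c1 - c0 + 1) := by
    rw [hprod, List.length_product, PySem.List.length_pyRange_one, PySem.List.length_pyRange_one]
    push_cast
    rw [Int.toNat_of_nonneg (by omega), Int.toNat_of_nonneg (by omega)]
    ring
  by_cases h : PySem.Set.equal S L = true
  · rw [h]
    have hperm : S.Perm L := (List.perm_ext_iff_of_nodup hS hndL).mpr ((PySem.Set.equal_iff _ _).mp h)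
    rw [← hlenL, hperm.length_eq]
    simp
  · rw [Bool.eq_false_iff.mpr h]
    symm
    rw [Bool.eq_false_iff]
    intro hlen
    apply h
    have hlen' : S.length = L.length := by
      have := beq_iff_eq.mp hlen
      omega
    have hsub : S ⊆ L := fun x hx => (hmemL x).mpr (hin x hx)
    have hperm : S.Perm L :=
      (List.subperm_of_subset hS hsub).perm_of_length_le (le_of_eq hlen'.symm)
    exact (PySem.Set.equal_iff _ _).mpr (fun x => hperm.mem_iff)

-- ===== VERDICT (by name: the statement is the Claim_ definition above) =====
theorem is_rect_fill_py_spec : Claim_equal_is_rect_fill_py := by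
  intro cells _
  unfold Spec_is_rect_fill_py
  match cells with
  | [] => rfl
  | p :: tl =>
    simp only [is_rect_fill_py, is_rect_fill_py_alt, List.map_cons, reduceCtorEq, if_false]
    rw [PySem.List.min?_id_cons, PySem.List.max?_id_cons,
        PySem.List.min?_id_cons, PySem.List.max?_id_cons]
    set r0 := (tl.map (fun p => p.1)).foldl min p.1 with hr0
    set r1 := (tl.map (fun p => p.1)).foldl max p.1 with hr1
    set c0 := (tl.map (fun p => p.2)).foldl min p.2 with hc0
    set c1 := (tl.map (fun p => p.2)).foldl max p.2 with hc1
    have hfold : tl.foldl rectFillStep (p.1, p.1, p.2, p.2) = (r0, r1, c0, c1) := by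
      rw [foldl_rectFillStep tl p.1 p.1 p.2 p.2 le_rfl le_rfl]
    rw [hfold]
    -- bounds from min?/max? of the row/col lists
    have hminr := PySem.List.min?_isMin (xs := (p :: tl).map (fun p => p.1)) (key := fun y => y)
      (m := r0) (by rw [List.map_cons, PySem.List.min?_id_cons])
    have hmaxr := PySem.List.max?_isMax (xs := (p :: tl).map (fun p => p.1)) (key := fun y => y)
      (m := r1) (by rw [List.map_cons, PySem.List.max?_id_cons])
    have hminc := PySem.List.min?_isMin (xs := (p :: tl).map (fun p => p.2)) (key := fun y => y)
      (m := c0) (by rw [List.map_cons, PySem.List.min?_id_cons])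
    have hmaxc := PySem.List.max?_isMax (xs := (p :: tl).map (fun p => p.2)) (key := fun y => y)
      (m := c1) (by rw [List.map_cons, PySem.List.max?_id_cons])
    have hin : ∀ x ∈ (p :: tl), r0 ≤ x.1 ∧ x.1 ≤ r1 ∧ c0 ≤ x.2 ∧ x.2 ≤ c1 := by
      intro x hx
      exact ⟨hminr x.1 (List.mem_map_of_mem hx), hmaxr x.1 (List.mem_map_of_mem hx),
             hminc x.2 (List.mem_map_of_mem hx), hmaxc x.2 (List.mem_map_of_mem hx)⟩
    have hr : r0 ≤ r1 := le_trans (hminr p.1 (by simp)) (hmaxr p.1 (by simp))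
    have hc : c0 ≤ c1 := le_trans (hminc p.2 (by simp)) (hmaxc p.2 (by simp))
    have hinS : ∀ x ∈ PySem.Set.ofList (p :: tl), r0 ≤ x.1 ∧ x.1 ≤ r1 ∧ c0 ≤ x.2 ∧ x.2 ≤ c1 := by
      intro x hx; exact hin x ((PySem.Set.mem_ofList _ _).mp hx)
    exact set_eq_rect_iff_len (PySem.Set.ofList (p :: tl)) r0 r1 c0 c1
      (PySem.Set.nodup_ofList _) hr hc hinS
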